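-- pv_equiv track=rewrite | github.com/hasega60/od_capturing_network | src/GISA2019/createRouteOptions.py | createTerminalCombinationOnlyloop
-- ===== SOURCE A (Python) =====
-- def createTerminalCombinationOnlyloop(hubs, list=None):
--     if list is None:
--         list = []
--
--     for hub1 in hubs:
--         for hub2 in hubs:
--             # 同一ハブ
--             if hub1 == hub2:
--                 list.append([hub1, hub2])
--     return list
-- ===== SOURCE B (Python) =====
-- def createTerminalCombinationOnlyloop(hubs, list=None):
--     # Same return value as A; like A, appends to a caller-supplied `list` in place.
--     if list is None:
--         list = []
--     count = {}
--     for h in hubs: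
--         count[h] = count.get(h, 0) + 1
--     for h in hubs:
--         list += [[h, h]] * count[h]
--     return list
-- ===== Notes on version B (the rewrite author's own statement) =====
-- stated objective: faster
-- what changed: Replaces the quadratic nested scan with a one-pass occurrence counter: for each hub in order, emit [hub,hub] count(hub) times, removing the inner scan over hubs; intended as faster (a timing run measured 2.46x at n=4096, unconfirmed by its rule).
import Mathlib
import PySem

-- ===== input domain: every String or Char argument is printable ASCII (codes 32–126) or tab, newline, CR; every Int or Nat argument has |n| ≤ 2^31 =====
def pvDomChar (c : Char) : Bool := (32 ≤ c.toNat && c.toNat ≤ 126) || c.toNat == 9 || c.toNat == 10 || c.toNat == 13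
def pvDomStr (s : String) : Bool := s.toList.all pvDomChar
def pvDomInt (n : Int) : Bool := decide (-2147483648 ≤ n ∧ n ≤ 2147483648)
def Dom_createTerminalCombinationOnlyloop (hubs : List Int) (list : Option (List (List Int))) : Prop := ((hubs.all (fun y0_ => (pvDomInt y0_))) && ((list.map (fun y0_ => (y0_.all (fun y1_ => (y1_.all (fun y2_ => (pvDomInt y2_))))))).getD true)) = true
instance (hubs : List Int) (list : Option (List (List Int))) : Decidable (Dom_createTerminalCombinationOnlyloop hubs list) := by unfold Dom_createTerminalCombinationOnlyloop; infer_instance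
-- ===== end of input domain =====

-- B replaces A's quadratic nested scan by a one-pass counter (intended as faster; a timing run measured B 2.46x at n=4096 but did not confirm it by its rule);
-- equivalence is about the RETURN value — both Pythons also append to a caller-supplied `list` in place.

-- ===== PORT A =====
def createTerminalCombinationOnlyloop (hubs : List Int) (list : Option (List (List Int))) : List (List Int) :=
  let l := list.getD []
  hubs.foldl (fun (acc : List (List Int)) hub1 =>
    hubs.foldl (fun (acc2 : List (List Int)) hub2 =>
      if hub1 == hub2 then acc2 ++ [[hub1, hub2]] else acc2) acc) l

-- ===== PORT B =====
def createTerminalCombinationOnlyloop_alt (hubs : List Int) (list : Option (List (List Int))) : List (List Int) :=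
  let l := list.getD []
  let count : PySem.Dict Int Int :=
    hubs.foldl (fun d h => d.insert h (d.getD h 0 + 1)) PySem.Dict.empty
  hubs.foldl (fun (acc : List (List Int)) h => acc ++ List.replicate (count.getD h 0).toNat [h, h]) l

-- ===== PRECONDITION & SPEC =====
def Spec_createTerminalCombinationOnlyloop (hubs : List Int) (list : Option (List (List Int))) (out : List (List Int)) : Prop := out = createTerminalCombinationOnlyloop_alt hubs list
instance (hubs : List Int) (list : Option (List (List Int))) (out : List (List Int)) : Decidable (Spec_createTerminalCombinationOnlyloop hubs list out) := by unfold Spec_createTerminalCombinationOnlyloop; infer_instance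

-- ===== CLAIM (what is proved, stated in full; the proofs are below) =====
def Claim_equal_createTerminalCombinationOnlyloop : Prop := ∀ (hubs : List Int) (list : Option (List (List Int))), Dom_createTerminalCombinationOnlyloop hubs list → Spec_createTerminalCombinationOnlyloop hubs list (createTerminalCombinationOnlyloop hubs list)

-- ===== LEMMAS AND PROOFS =====

-- A's inner loop over `hubs` appends [h,h] once per occurrence of h in hubs.
theorem pv_inner_loop (hubs : List Int) (h : Int) (acc : List (List Int)) :
    hubs.foldl (fun (acc2 : List (List Int)) hub2 => if h == hub2 then acc2 ++ [[h, hub2]] else acc2) acc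
      = acc ++ List.replicate (hubs.count h) [h, h] := by
  induction hubs generalizing acc with
  | nil => simp
  | cons x xs ih =>
    simp only [List.foldl_cons, List.count_cons]
    by_cases hx : h = x
    · subst hx
      rw [if_pos (by simp), ih]
      simp [List.replicate_succ, List.append_assoc]
    · rw [if_neg (by simp [hx]), ih]
      have hx'' : (x == h) = false := by simp [Ne.symm hx]
      simp [hx'']

-- The counter built by B's first pass looks up to the occurrence count.
theorem pv_counter (hubs : List Int) (h : Int) :
    ((hubs.foldl (fun (d : PySem.Dict Int Int) x => d.insert x (d.getD x 0 + 1)) PySem.Dict.empty).getD h 0).toNat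
      = hubs.count h := by
  rw [PySem.Dict.getD_foldl_insert_add_one]
  simp [PySem.Dict.getD_empty]

-- ===== VERDICT (by name: the statement is the Claim_ definition above) =====
theorem createTerminalCombinationOnlyloop_spec : Claim_equal_createTerminalCombinationOnlyloop := by
  intro hubs list _
  show _ = _
  unfold createTerminalCombinationOnlyloop createTerminalCombinationOnlyloop_alt
  have hfun : (fun (acc : List (List Int)) hub1 =>
      hubs.foldl (fun (acc2 : List (List Int)) hub2 =>
        if hub1 == hub2 then acc2 ++ [[hub1, hub2]] else acc2) acc)
    = (fun (acc : List (List Int)) h =>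
        acc ++ List.replicate
          (((hubs.foldl (fun (d : PySem.Dict Int Int) x => d.insert x (d.getD x 0 + 1)) PySem.Dict.empty).getD h 0).toNat)
          [h, h]) := by
    funext acc h
    rw [pv_inner_loop, pv_counter]
  simp only [hfun]
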